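-- pv_equiv track=rewrite | github.com/royashish-in/AgentAICoder | coding-crew/agents/architecture_advisor.py | _extract_refactoring_tasks
-- ===== SOURCE A (Python) =====
-- from typing import Dict, List, Any
--
-- def _extract_refactoring_tasks(refactoring_content: str) -> List[Dict[str, Any]]:
--     """Extract structured refactoring tasks."""
--     tasks = []
--     lines = refactoring_content.split('\n')
--
--     current_task = {}
--     for line in lines:
--         line = line.strip()
--         if 'refactor' in line.lower() or 'extract' in line.lower() or 'improve' in line.lower():
--             if current_task:
--                 tasks.append(current_task)
--             current_task = {
--                 "title": line,
--                 "description": "",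
--                 "complexity": "Medium",
--                 "impact": "Medium"
--             }
--         elif current_task and line:
--             current_task["description"] += line + " "
--
--     if current_task:
--         tasks.append(current_task)
--
--     return tasks[:5]
-- ===== SOURCE B (Python) =====
-- def _extract_refactoring_tasks(refactoring_content):
--     """Extract structured refactoring tasks (boundary-scan decomposition)."""
--     def is_header(line):
--         low = line.lower()
--         return 'refactor' in low or 'extract' in low or 'improve' in low
--
--     stripped = [ln.strip() for ln in refactoring_content.split('\n')]
--     n = len(stripped)
--
--     i = 0
--     while i < n and not is_header(stripped[i]):
--         i += 1
--
--     tasks = []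
--     while i < n and len(tasks) < 5:
--         body = []
--         j = i + 1
--         while j < n and not is_header(stripped[j]):
--             if stripped[j]:
--                 body.append(stripped[j])
--             j += 1
--         tasks.append({
--             "title": stripped[i],
--             "description": ' '.join(body) + ' ' if body else '',
--             "complexity": "Medium",
--             "impact": "Medium",
--         })
--         i = j
--     return tasks
-- ===== Notes on version B (the rewrite author's own statement) =====
-- stated objective: alternative
-- what changed: Replaces the running-accumulator dict loop with a boundary-scan decomposition: skip to the first header, then for each header scan forward to the next header collecting the non-empty body lines and join them, stopping after five tasks.
import Mathlib
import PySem

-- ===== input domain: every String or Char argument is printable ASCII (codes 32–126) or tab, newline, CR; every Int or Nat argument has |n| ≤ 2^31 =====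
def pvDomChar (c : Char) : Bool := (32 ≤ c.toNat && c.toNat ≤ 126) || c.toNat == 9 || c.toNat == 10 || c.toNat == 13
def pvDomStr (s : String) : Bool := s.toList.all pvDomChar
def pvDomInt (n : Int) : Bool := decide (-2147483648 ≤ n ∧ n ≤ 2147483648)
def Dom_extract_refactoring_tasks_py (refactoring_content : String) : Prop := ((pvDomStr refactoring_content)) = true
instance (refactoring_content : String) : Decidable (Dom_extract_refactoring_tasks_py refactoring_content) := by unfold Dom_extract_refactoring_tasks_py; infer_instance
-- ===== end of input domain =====

-- B replaces A's running-accumulator loop by a boundary-scan decomposition: skip to the first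
-- header line, then per header collect the non-empty lines up to the next header and join them
-- (objective: alternative decomposition, same cost).


-- ===== PORT A =====
-- 'refactor' in line.lower() or 'extract' in line.lower() or 'improve' in line.lower()
def aHeader (line : List Char) : Bool :=
  PySem.Chars.isIn "refactor".toList (PySem.Chars.lower line)
  || PySem.Chars.isIn "extract".toList (PySem.Chars.lower line)
  || PySem.Chars.isIn "improve".toList (PySem.Chars.lower line)

-- the task dict {"title": t, "description": d, "complexity": "Medium", "impact": "Medium"}
-- (keys are fixed literals and only "description" is updated in place, which keeps insertion
-- order, so the dict is carried as the pair (title, description chars) and rendered here)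
def mkTask (t d : List Char) : List (String × String) :=
  [("title", String.ofList t), ("description", String.ofList d),
   ("complexity", "Medium"), ("impact", "Medium")]

-- 'if current_task: tasks.append(current_task)'  (current_task = {} is the falsy case = none)
def closeA (st : List (List (String × String)) × Option (List Char × List Char)) :
    List (List (String × String)) :=
  match st.2 with
  | some (t, d) => st.1 ++ [mkTask t d]
  | none => st.1

-- one iteration of A's for-loop; state = (tasks, current_task as Option (title, description))
def aStep (st : List (List (String × String)) × Option (List Char × List Char))
    (line0 : List Char) : List (List (String × String)) × Option (List Char × List Char) :=
  let line := PySem.Chars.strip line0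
  if aHeader line then
    (closeA st, some (line, []))
  else
    match st.2 with
    | some (t, d) => if line ≠ [] then (st.1, some (t, d ++ line ++ [' '])) else st
    | none => st

def extract_refactoring_tasks_py (refactoring_content : String) : List (List (String × String)) :=
  let lines := PySem.Chars.splitOn refactoring_content.toList ['\n']
  let st := lines.foldl aStep ([], none)
  let tasks := closeA st
  PySem.List.slice tasks none (some 5)

-- ===== PORT B =====
def bHeader (line : List Char) : Bool :=
  let low := PySem.Chars.lower line
  PySem.Chars.isIn "refactor".toList low
  || PySem.Chars.isIn "extract".toList low
  || PySem.Chars.isIn "improve".toList low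

-- 'while i < n and not is_header(stripped[i]): i += 1'
def bScan (ls : List (List Char)) (i : Nat) : Nat :=
  if h : i < ls.length then
    if bHeader ls[i] then i else bScan ls (i + 1)
  else i
termination_by ls.length - i

-- inner while loop: collect non-empty lines until the next header; returns (j, body)
def bCollect (ls : List (List Char)) (j : Nat) (body : List (List Char)) :
    Nat × List (List Char) :=
  if h : j < ls.length then
    if bHeader ls[j] then (j, body)
    else bCollect ls (j + 1) (if ls[j] ≠ [] then body ++ [ls[j]] else body)
  else (j, body)
termination_by ls.length - j

-- needed by bBuild's termination
theorem bCollect_ge (ls : List (List Char)) (j : Nat) (body : List (List Char)) :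
    j ≤ (bCollect ls j body).1 := by
  unfold bCollect
  split
  · split
    · simp
    · exact le_trans (Nat.le_succ j) (bCollect_ge ls (j + 1) _)
  · simp
termination_by ls.length - j

-- ' '.join(body) + ' ' if body else ''
def bDesc (body : List (List Char)) : List Char :=
  if body ≠ [] then PySem.Chars.join [' '] body ++ [' '] else []

-- outer while loop: one task per header, stop at five
def bBuild (ls : List (List Char)) (i : Nat) (tasks : List (List (String × String))) :
    List (List (String × String)) :=
  if h : i < ls.length ∧ tasks.length < 5 then
    let r := bCollect ls (i + 1) []
    bBuild ls r.1 (tasks ++ [mkTask ls[i] (bDesc r.2)])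
  else tasks
termination_by ls.length - i
decreasing_by
  have := bCollect_ge ls (i + 1) []
  omega

def extract_refactoring_tasks_py_alt (refactoring_content : String) :
    List (List (String × String)) :=
  let stripped := (PySem.Chars.splitOn refactoring_content.toList ['\n']).map PySem.Chars.strip
  bBuild stripped (bScan stripped 0) []

-- ===== PRECONDITION & SPEC =====
def Spec_extract_refactoring_tasks_py (refactoring_content : String) (out : List (List (String × String))) : Prop := out = extract_refactoring_tasks_py_alt refactoring_content
instance (refactoring_content : String) (out : List (List (String × String))) : Decidable (Spec_extract_refactoring_tasks_py refactoring_content out) := by unfold Spec_extract_refactoring_tasks_py; infer_instance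

-- ===== CLAIM (what is proved, stated in full; the proofs are below) =====
def Claim_equal_extract_refactoring_tasks_py : Prop := ∀ (refactoring_content : String), Dom_extract_refactoring_tasks_py refactoring_content → Spec_extract_refactoring_tasks_py refactoring_content (extract_refactoring_tasks_py refactoring_content)

-- ===== LEMMAS AND PROOFS =====

-- description chars produced by A while scanning up to the next header
def bodyChars : List (List Char) → List Char
  | [] => []
  | l :: ls => if bHeader l then [] else (if l ≠ [] then l ++ [' '] else []) ++ bodyChars ls

-- non-empty lines up to the next header (B's body list)
def bodyList : List (List Char) → List (List Char)
  | [] => []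
  | l :: ls => if bHeader l then [] else (if l ≠ [] then [l] else []) ++ bodyList ls

-- drop lines until the first header
def after : List (List Char) → List (List Char)
  | [] => []
  | l :: ls => if bHeader l then l :: ls else after ls

theorem after_nil : after [] = [] := rfl
theorem after_cons (l : List Char) (ls : List (List Char)) :
    after (l :: ls) = if bHeader l then l :: ls else after ls := rfl
theorem bodyChars_cons (l : List Char) (ls : List (List Char)) :
    bodyChars (l :: ls) = if bHeader l then [] else (if l ≠ [] then l ++ [' '] else []) ++ bodyChars ls := rfl
theorem bodyList_cons (l : List Char) (ls : List (List Char)) :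
    bodyList (l :: ls) = if bHeader l then [] else (if l ≠ [] then [l] else []) ++ bodyList ls := rfl

theorem after_length_le (ls : List (List Char)) : (after ls).length ≤ ls.length := by
  induction ls with
  | nil => simp [after_nil]
  | cons l ls ih =>
    rw [after_cons]
    split
    · simp
    · exact le_trans ih (Nat.le_succ _)

-- the (title, description) sections of a stripped line list
def secs : List (List Char) → List (List Char × List Char)
  | [] => []
  | l :: ls =>
    if bHeader l then (l, bodyChars ls) :: secs (after ls) else secs ls
termination_by ls => ls.length
decreasing_by
  · exact Nat.lt_succ_of_le (after_length_le ls)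
  · exact Nat.lt_succ_self _

theorem secs_nil : secs [] = [] := by rw [secs]
theorem secs_cons (l : List Char) (ls : List (List Char)) :
    secs (l :: ls) = if bHeader l then (l, bodyChars ls) :: secs (after ls) else secs ls := by
  rw [secs]

theorem aHeader_eq (l : List Char) : aHeader l = bHeader l := rfl

theorem closeA_some (ts : List (List (String × String))) (t d : List Char) :
    closeA (ts, some (t, d)) = ts ++ [mkTask t d] := rfl
theorem closeA_none (ts : List (List (String × String))) :
    closeA (ts, none) = ts := rfl

-- A's step on an already-stripped line
def aStep' (st : List (List (String × String)) × Option (List Char × List Char))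
    (line : List Char) : List (List (String × String)) × Option (List Char × List Char) :=
  if aHeader line then
    (closeA st, some (line, []))
  else
    match st.2 with
    | some (t, d) => if line ≠ [] then (st.1, some (t, d ++ line ++ [' '])) else st
    | none => st

theorem foldl_aStep_eq (lines : List (List Char)) (st) :
    lines.foldl aStep st = (lines.map PySem.Chars.strip).foldl aStep' st := by
  rw [List.foldl_map]; rfl

theorem fold_some (ls : List (List Char)) (ts : List (List (String × String)))
    (t d : List Char) :
    closeA (ls.foldl aStep' (ts, some (t, d))) =
      ts ++ mkTask t (d ++ bodyChars ls) :: (secs (after ls)).map (fun p => mkTask p.1 p.2) := by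
  induction ls generalizing ts t d with
  | nil => simp [closeA, bodyChars, after_nil, secs_nil]
  | cons l ls ih =>
    simp only [List.foldl_cons, aStep', aHeader_eq, closeA_some, bodyChars_cons, after_cons]
    by_cases hh : bHeader l
    · simp only [hh, if_true]
      rw [ih, secs_cons]
      simp [hh]
    · simp only [hh, Bool.false_eq_true, if_false]
      by_cases hl : l = []
      · subst hl
        simp only [ne_eq, not_true_eq_false, if_false]
        rw [ih]
        simp
      · simp only [ne_eq, hl, not_false_eq_true, if_true]
        rw [ih]
        simp [List.append_assoc]

theorem fold_none (ls : List (List Char)) (ts : List (List (String × String))) :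
    closeA (ls.foldl aStep' (ts, none)) = ts ++ (secs ls).map (fun p => mkTask p.1 p.2) := by
  induction ls generalizing ts with
  | nil => simp [closeA, secs_nil]
  | cons l ls ih =>
    simp only [List.foldl_cons, aStep', aHeader_eq, closeA_none]
    by_cases hh : bHeader l
    · simp only [hh, if_true]
      rw [fold_some, secs_cons]
      simp [hh]
    · simp only [hh, Bool.false_eq_true, if_false]
      rw [ih, secs_cons]
      simp [hh]

theorem secs_after (ls : List (List Char)) : secs (after ls) = secs ls := by
  induction ls with
  | nil => rfl
  | cons l ls ih =>
    rw [after_cons]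
    by_cases hh : bHeader l
    · simp [hh]
    · simp only [hh, Bool.false_eq_true, if_false]
      rw [ih, secs_cons]
      simp [hh]

theorem after_idem (ls : List (List Char)) : after (after ls) = after ls := by
  induction ls with
  | nil => rfl
  | cons l ls ih =>
    rw [after_cons]
    by_cases hh : bHeader l
    · simp [after_cons, hh]
    · simp only [hh, Bool.false_eq_true, if_false]
      exact ih

theorem bScan_drop (ls : List (List Char)) (i : Nat) :
    ls.drop (bScan ls i) = after (ls.drop i) := by
  rw [bScan]
  split
  · rename_i h
    rw [List.drop_eq_getElem_cons h, after_cons]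
    by_cases hh : bHeader ls[i]
    · rw [if_pos hh, if_pos hh, ← List.drop_eq_getElem_cons h]
    · rw [if_neg hh, if_neg hh, bScan_drop ls (i + 1)]
  · rename_i h
    rw [List.drop_eq_nil_of_le (show ls.length ≤ i by omega), after_nil]
termination_by ls.length - i

theorem bCollect_spec (ls : List (List Char)) (j : Nat) (acc : List (List Char)) :
    (bCollect ls j acc).2 = acc ++ bodyList (ls.drop j) ∧
      ls.drop (bCollect ls j acc).1 = after (ls.drop j) := by
  rw [bCollect]
  split
  · rename_i h
    rw [List.drop_eq_getElem_cons h, bodyList_cons, after_cons]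
    by_cases hh : bHeader ls[j]
    · rw [if_pos hh, if_pos hh, if_pos hh]
      exact ⟨by simp, by rw [← List.drop_eq_getElem_cons h]⟩
    · rw [if_neg hh, if_neg hh, if_neg hh]
      have := bCollect_spec ls (j + 1) (if ls[j] ≠ [] then acc ++ [ls[j]] else acc)
      refine ⟨?_, this.2⟩
      rw [this.1]
      by_cases hl : ls[j] = [] <;> simp [hl]
  · rename_i h
    rw [List.drop_eq_nil_of_le (show ls.length ≤ j by omega)]
    simp [bodyList, after_nil]
termination_by ls.length - j

theorem bodyChars_flatten (ls : List (List Char)) :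
    bodyChars ls = ((bodyList ls).map (fun l => l ++ [' '])).flatten := by
  induction ls with
  | nil => simp [bodyChars, bodyList]
  | cons l ls ih =>
    rw [bodyChars_cons, bodyList_cons]
    by_cases hh : bHeader l
    · simp [hh]
    · simp only [hh, Bool.false_eq_true, if_false]
      by_cases hl : l = [] <;> simp [hl, ih]

theorem join_space (body : List (List Char)) (h : body ≠ []) :
    PySem.Chars.join [' '] body ++ [' '] = (body.map (fun l => l ++ [' '])).flatten := by
  induction body with
  | nil => simp at h
  | cons x rest ih =>
    cases rest with
    | nil => simp [PySem.Chars.join_singleton]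
    | cons y rest' =>
      rw [PySem.Chars.join_cons_cons, List.append_assoc (x ++ [' ']), ih (by simp)]
      simp

theorem bDesc_eq (ls : List (List Char)) : bDesc (bodyList ls) = bodyChars ls := by
  rw [bodyChars_flatten, bDesc]
  by_cases h : bodyList ls = []
  · simp [h]
  · rw [if_pos (by simpa using h), join_space _ h]

theorem bBuild_spec (ls : List (List Char)) (i : Nat) (ts : List (List (String × String)))
    (hn : after (ls.drop i) = ls.drop i) :
    bBuild ls i ts =
      ts ++ ((secs (ls.drop i)).map (fun p => mkTask p.1 p.2)).take (5 - ts.length) := by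
  rw [bBuild]
  split
  · rename_i h
    obtain ⟨hi, hts⟩ := h
    rw [List.drop_eq_getElem_cons hi, after_cons] at hn
    have hh : bHeader ls[i] := by
      by_contra hh
      rw [if_neg hh] at hn
      have h1 := after_length_le (ls.drop (i + 1))
      rw [hn] at h1
      simp only [List.length_cons, List.length_drop] at h1
      omega
    have hc := bCollect_spec ls (i + 1) []
    rw [bBuild_spec ls (bCollect ls (i + 1) []).1 _ (by rw [hc.2, after_idem])]
    rw [hc.2, hc.1, List.nil_append, bDesc_eq]
    rw [List.drop_eq_getElem_cons hi, secs_cons, if_pos hh]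
    simp only [List.map_cons]
    have hk : 5 - ts.length = (5 - (ts ++ [mkTask ls[i] (bodyChars (ls.drop (i + 1)))]).length) + 1 := by
      simp only [List.length_append, List.length_cons, List.length_nil]
      omega
    rw [hk, List.take_succ_cons]
    simp [List.append_assoc]
  · rename_i h
    by_cases hi : i < ls.length
    · have hts : ¬ ts.length < 5 := fun hts => h ⟨hi, hts⟩
      rw [Nat.sub_eq_zero_of_le (le_of_not_gt hts), List.take_zero, List.append_nil]
    · rw [List.drop_eq_nil_of_le (le_of_not_gt hi), secs_nil]
      simp
termination_by ls.length - i
decreasing_by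
  have := bCollect_ge ls (i + 1) []
  omega

-- ===== VERDICT (by name: the statement is the Claim_ definition above) =====
theorem extract_refactoring_tasks_py_spec : Claim_equal_extract_refactoring_tasks_py := by
  intro rc _
  show extract_refactoring_tasks_py rc = extract_refactoring_tasks_py_alt rc
  simp only [extract_refactoring_tasks_py, extract_refactoring_tasks_py_alt]
  rw [foldl_aStep_eq, fold_none, bBuild_spec _ _ _ (by rw [bScan_drop, List.drop_zero, after_idem])]
  rw [bScan_drop, List.drop_zero, secs_after]
  rw [PySem.List.slice_to _ (by norm_num)]
  simp
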